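-- pv_equiv track=rewrite | github.com/MasterScott/matasano-cryptochallenges | vigenere.py | recreate_trasposed_text
-- ===== SOURCE A (Python) =====
-- def recreate_trasposed_text(transposed_blocks):
--     valid_text = ''
--     for idx in range(len(transposed_blocks[0])):
--         for b in transposed_blocks:
--             try:
--                 valid_text += b[idx]
--             except IndexError:
--                 if idx != len(transposed_blocks) - 1:
--                     assert("Incorrect block")
--     return valid_text
-- ===== SOURCE B (Python) =====
-- def recreate_trasposed_text(transposed_blocks):
--     n = len(transposed_blocks[0])
--     cols = [b[:n] for b in transposed_blocks]
--     out = []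
--     while any(cols):
--         out.extend(c[0] for c in cols if c)
--         cols = [c[1:] for c in cols if c]
--     return ''.join(out)
-- ===== Notes on version B (the rewrite author's own statement) =====
-- stated objective: alternative
-- what changed: Replaces the index-based double loop with try/except (idx over range(len(blocks[0])), b[idx] per block) by a heads-then-tails transpose: truncate each block to len(blocks[0]), then repeatedly emit the heads of the non-empty columns and drop to their tails, never indexing.
import Mathlib
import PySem

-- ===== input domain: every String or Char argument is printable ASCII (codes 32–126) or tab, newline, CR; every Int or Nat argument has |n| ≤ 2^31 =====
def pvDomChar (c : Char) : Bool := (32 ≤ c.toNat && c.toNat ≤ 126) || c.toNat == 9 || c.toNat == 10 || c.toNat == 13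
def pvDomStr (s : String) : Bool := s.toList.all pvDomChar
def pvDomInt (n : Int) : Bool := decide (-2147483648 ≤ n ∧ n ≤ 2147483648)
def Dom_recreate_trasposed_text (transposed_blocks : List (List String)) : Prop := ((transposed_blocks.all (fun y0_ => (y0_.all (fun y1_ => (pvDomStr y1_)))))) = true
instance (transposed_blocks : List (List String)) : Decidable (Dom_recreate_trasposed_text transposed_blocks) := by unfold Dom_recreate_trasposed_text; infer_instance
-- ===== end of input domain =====

-- B replaces A's index-based row loop (b[idx] under try/except) with a heads-then-tails
-- transpose of the blocks truncated to len(blocks[0]); objective: alternative structure, same cost.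

-- ===== PORT A =====
-- Python string concatenation is exact as List Char concatenation (PySem.Chars convention);
-- the accumulator is kept as List Char and wrapped with String.mk at the end.
def recreate_trasposed_text (transposed_blocks : List (List String)) : String :=
  String.mk ((PySem.List.pyRange 0 (((transposed_blocks.headD []).length : Int)) 1).foldl
    (fun acc idx =>
      transposed_blocks.foldl
        (fun acc2 b =>
          match PySem.List.pyGet? b idx with
          | some s => acc2 ++ s.toList          -- valid_text += b[idx]
          | none => acc2)                       -- except IndexError: (assert is a no-op)
        acc)
    [])

-- ===== PORT B =====
-- termination helpers for the while-loop recursion (cited by pvRounds's decreasing_by)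
theorem pvTailsSum_le (cs : List (List String)) :
    (((cs.filter (fun c => !c.isEmpty)).map (fun c => c.tail.length)).sum)
      ≤ ((cs.map List.length).sum) := by
  induction cs with
  | nil => simp
  | cons c rest ih =>
    by_cases hc : c.isEmpty
    · simp only [List.filter_cons, hc, Bool.not_true, if_neg Bool.false_ne_true,
        List.map_cons, List.sum_cons]
      omega
    · have hc' : (!c.isEmpty) = true := by simp [hc]
      simp only [List.filter_cons, hc', if_pos trivial, List.map_cons, List.sum_cons]
      have : c.tail.length ≤ c.length := by cases c <;> simp
      omega

theorem pvTailsSum_lt (cols : List (List String)) (h : cols.any (fun c => !c.isEmpty) = true) :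
    (((cols.filter (fun c => !c.isEmpty)).map (fun c => c.tail.length)).sum)
      < ((cols.map List.length).sum) := by
  induction cols with
  | nil => simp at h
  | cons c rest ih =>
    by_cases hc : c.isEmpty
    · have hr : rest.any (fun c => !c.isEmpty) = true := by
        simp [hc] at h; simpa using h
      simp only [List.filter_cons, hc, Bool.not_true, if_neg Bool.false_ne_true,
        List.map_cons, List.sum_cons]
      have := ih hr
      omega
    · have hc' : (!c.isEmpty) = true := by simp [hc]
      simp only [List.filter_cons, hc', if_pos trivial, List.map_cons, List.sum_cons]
      have h1 : c.tail.length < c.length := by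
        cases c with
        | nil => simp at hc
        | cons x xs => simp
      have h2 := pvTailsSum_le rest
      omega

-- while any(cols): out.extend(c[0] for c in cols if c); cols = [c[1:] for c in cols if c]
def pvRounds (cols : List (List String)) : List String :=
  if h : cols.any (fun c => !c.isEmpty) then
    cols.filterMap List.head? ++
      pvRounds ((cols.filter (fun c => !c.isEmpty)).map (fun c => PySem.List.slice c (some 1) none))
  else []
termination_by (cols.map List.length).sum
decreasing_by
  simp only [List.map_subtype, List.unattach_filter, List.unattach_attach,
    PySem.List.slice_from_one, List.map_map, Function.comp_def]
  exact pvTailsSum_lt cols (by assumption)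

def recreate_trasposed_text_alt (transposed_blocks : List (List String)) : String :=
  let n := (transposed_blocks.headD []).length
  let cols := transposed_blocks.map (fun b => PySem.List.slice b none (some (n : Int)))
  PySem.Str.join "" (pvRounds cols)

-- ===== PRECONDITION & SPEC =====
-- Pre_ excludes only the empty list, on which A raises IndexError at transposed_blocks[0].
def Pre_recreate_trasposed_text (transposed_blocks : List (List String)) : Prop :=
  transposed_blocks ≠ []
instance (transposed_blocks : List (List String)) : Decidable (Pre_recreate_trasposed_text transposed_blocks) := by unfold Pre_recreate_trasposed_text; infer_instance

def pvWitness_recreate_trasposed_text : List (List String) := [["ab", "c"], ["x"]]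

def Spec_recreate_trasposed_text (transposed_blocks : List (List String)) (out : String) : Prop := out = recreate_trasposed_text_alt transposed_blocks
instance (transposed_blocks : List (List String)) (out : String) : Decidable (Spec_recreate_trasposed_text transposed_blocks out) := by unfold Spec_recreate_trasposed_text; infer_instance

-- ===== CLAIM (what is proved, stated in full; the proofs are below) =====
def Claim_equal_recreate_trasposed_text : Prop := ∀ (transposed_blocks : List (List String)), Dom_recreate_trasposed_text transposed_blocks → Pre_recreate_trasposed_text transposed_blocks → Spec_recreate_trasposed_text transposed_blocks (recreate_trasposed_text transposed_blocks)

-- ===== LEMMAS AND PROOFS =====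

-- A's inner loop over the blocks appends, per block, the characters of b[idx] (nothing on IndexError)
theorem pvInnerA (tb : List (List String)) (idx : Int) (acc : List Char) :
    tb.foldl (fun acc2 b =>
        match PySem.List.pyGet? b idx with
        | some s => acc2 ++ s.toList
        | none => acc2) acc
      = acc ++ tb.flatMap (fun b => ((PySem.List.pyGet? b idx).map String.toList).getD []) := by
  induction tb generalizing acc with
  | nil => simp
  | cons b rest ih =>
    cases h : PySem.List.pyGet? b idx <;> simp [h, ih]

-- A's outer loop over a list of row indices, in flatMap form
theorem pvAfold (tb : List (List String)) (l : List Nat) (acc : List Char) :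
    l.foldl (fun acc j => tb.foldl (fun acc2 b =>
        match PySem.List.pyGet? b (Int.ofNat j) with
        | some s => acc2 ++ s.toList
        | none => acc2) acc) acc
      = acc ++ l.flatMap (fun j => tb.flatMap (fun b => ((getElem? b j).map String.toList).getD [])) := by
  induction l generalizing acc with
  | nil => simp
  | cons j rest ih =>
    simp only [List.foldl_cons, List.flatMap_cons]
    rw [pvInnerA, ih]
    simp [PySem.List.pyGet?_natCast]

-- reading row j+1 of the columns = reading row j of the non-empty columns' tails
theorem pvShift (cols : List (List String)) (j : Nat) :
    cols.filterMap (fun c => getElem? c (j + 1))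
      = ((cols.filter (fun c => !c.isEmpty)).map List.tail).filterMap (fun c => getElem? c j) := by
  induction cols with
  | nil => simp
  | cons c rest ih =>
    cases c with
    | nil => simpa using ih
    | cons x xs =>
      simp only [List.filterMap_cons, List.getElem?_cons_succ, List.filter_cons,
        List.isEmpty_cons, Bool.not_false, if_pos trivial, List.map_cons, List.tail_cons]
      cases hx : getElem? xs j <;> simp [hx, ih]

-- B's while loop emits, row by row, the j-th entries of the columns
theorem pvRounds_eq (N : Nat) (cols : List (List String)) (hN : ∀ c ∈ cols, c.length ≤ N) :
    pvRounds cols = (List.range N).flatMap (fun j => cols.filterMap (fun c => getElem? c j)) := by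
  induction N generalizing cols with
  | zero =>
    have hall : ∀ c ∈ cols, c = [] := by
      intro c hc; have := hN c hc; simpa [List.length_eq_zero_iff] using this
    rw [pvRounds]
    have hfalse : cols.any (fun c => !c.isEmpty) = false := by
      simp only [List.any_eq_false]
      intro c hc; simp [hall c hc]
    rw [dif_neg (by simp [hfalse])]
    simp
  | succ N ih =>
    by_cases hany : cols.any (fun c => !c.isEmpty) = true
    · rw [pvRounds, dif_pos hany]
      simp only [PySem.List.slice_from_one]
      have htails : ∀ c ∈ (cols.filter (fun c => !c.isEmpty)).map List.tail, c.length ≤ N := by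
        intro c hc
        simp only [List.mem_map, List.mem_filter] at hc
        obtain ⟨d, ⟨hd, _⟩, rfl⟩ := hc
        have := hN d hd
        cases d <;> simp_all
      rw [ih _ htails]
      rw [List.range_succ_eq_map]
      simp only [List.flatMap_cons, List.flatMap_map, Nat.succ_eq_add_one]
      congr 1
      · simp [List.head?_eq_getElem?]
      · exact (List.flatMap_congr (fun j _ => pvShift cols j)).symm
    · rw [pvRounds, dif_neg (by simpa using hany)]
      have hall : ∀ c ∈ cols, c = [] := by
        intro c hc
        have hfalse : cols.any (fun c => !c.isEmpty) = false := by
          simpa using hany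
        have h2 := List.any_eq_false.mp hfalse c hc
        simpa [List.isEmpty_iff] using h2
      have : ∀ j : Nat, cols.filterMap (fun c => getElem? c j) = [] := by
        intro j
        rw [List.filterMap_eq_nil_iff]
        intro c hc; simp [hall c hc]
      simp [this]

-- row j of the truncated columns = the defined b[j] entries of the blocks (j < n)
theorem pvCol (tb : List (List String)) (n j : Nat) (hj : j < n) :
    tb.flatMap (fun b => ((getElem? b j).map String.toList).getD [])
      = ((tb.map (fun b => PySem.List.slice b none (some (n : Int)))).filterMap
          (fun c => getElem? c j)).flatMap String.toList := by
  induction tb with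
  | nil => simp
  | cons b rest ih =>
    simp only [List.flatMap_cons, List.map_cons, List.filterMap_cons,
      PySem.List.slice_to_natCast]
    rw [List.getElem?_take]
    cases hb : getElem? b j <;> simp [hj, hb, ih]

-- ''.join is concatenation on the code-point lists
theorem pvJoinNil (ls : List (List Char)) : PySem.Chars.join [] ls = ls.flatten := by
  induction ls with
  | nil => rfl
  | cons c rest ih =>
    simp only [PySem.Chars.join, List.intercalate] at *
    cases rest with
    | nil => simp
    | cons d rest2 => simp_all [List.intersperse]

theorem pvRangeCast (n : Nat) : PySem.List.pyRange 0 (n : Int) 1 = (List.range n).map Int.ofNat := by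
  rw [PySem.List.pyRange_one]
  simp

theorem pvMain (tb : List (List String)) :
    recreate_trasposed_text tb = recreate_trasposed_text_alt tb := by
  unfold recreate_trasposed_text recreate_trasposed_text_alt
  set n := (tb.headD []).length with hn
  set cols := tb.map (fun b => PySem.List.slice b none (some (n : Int))) with hcols
  have hlen : ∀ c ∈ cols, c.length ≤ n := by
    intro c hc
    rw [hcols] at hc
    simp only [List.mem_map] at hc
    obtain ⟨b, _, rfl⟩ := hc
    simp [PySem.List.slice_to_natCast]
  have hB : (PySem.Str.join "" (pvRounds cols)).toList
      = (List.range n).flatMap (fun j => (cols.filterMap (fun c => getElem? c j)).flatMap String.toList) := by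
    rw [PySem.Str.toList_join]
    rw [show ("" : String).toList = [] from rfl]
    rw [pvJoinNil]
    rw [pvRounds_eq n cols hlen]
    simp [List.map_flatMap, List.flatMap_def, List.flatten_flatten, List.map_map, Function.comp_def]
  have hA : (PySem.List.pyRange 0 ((n : Int)) 1).foldl
      (fun acc idx => tb.foldl (fun acc2 b =>
          match PySem.List.pyGet? b idx with
          | some s => acc2 ++ s.toList
          | none => acc2) acc) []
      = (List.range n).flatMap (fun j => tb.flatMap (fun b => ((getElem? b j).map String.toList).getD [])) := by
    rw [pvRangeCast, List.foldl_map]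
    rw [pvAfold]
    simp
  rw [hA]
  have hcong : (List.range n).flatMap (fun j => tb.flatMap (fun b => ((getElem? b j).map String.toList).getD []))
      = (List.range n).flatMap (fun j => (cols.filterMap (fun c => getElem? c j)).flatMap String.toList) := by
    apply List.flatMap_congr
    intro j hj
    exact pvCol tb n j (List.mem_range.mp hj)
  rw [hcong, ← hB]
  exact String.ofList_toList

-- ===== VERDICT (by name: the statement is the Claim_ definition above) =====
theorem recreate_trasposed_text_spec : Claim_equal_recreate_trasposed_text := by
  intro tb _ _
  unfold Spec_recreate_trasposed_text
  exact pvMain tb
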